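-- pv_equiv track=rewrite | github.com/SoumyaMoturi/Daily-Coding-Challenges | Day 076.py | lexicographical_order
-- ===== SOURCE A (Python) =====
-- def lexicographical_order(arr,m,n):
--     c=0
--     for i in range(n):
--         for j in range(1,m):
--             if ord(arr[i][j]) < ord(arr[i][j-1]):
--                 c+=1
--                 break
--     return c
-- ===== SOURCE B (Python) =====
-- def lexicographical_order(arr, m, n):
--     def out_of_order(i, j):
--         return j < m and (arr[i][j] < arr[i][j - 1] or out_of_order(i, j + 1))
--     return sum(out_of_order(i, 1) for i in range(n))
-- ===== Notes on version B (the rewrite author's own statement) =====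
-- stated objective: simpler
-- what changed: A maintains a counter through two nested loops with a break; B is a two-line recursive predicate (out-of-order on positions j..m-1 of word i, with short-circuit or) summed as booleans over range(n).
import Mathlib
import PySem

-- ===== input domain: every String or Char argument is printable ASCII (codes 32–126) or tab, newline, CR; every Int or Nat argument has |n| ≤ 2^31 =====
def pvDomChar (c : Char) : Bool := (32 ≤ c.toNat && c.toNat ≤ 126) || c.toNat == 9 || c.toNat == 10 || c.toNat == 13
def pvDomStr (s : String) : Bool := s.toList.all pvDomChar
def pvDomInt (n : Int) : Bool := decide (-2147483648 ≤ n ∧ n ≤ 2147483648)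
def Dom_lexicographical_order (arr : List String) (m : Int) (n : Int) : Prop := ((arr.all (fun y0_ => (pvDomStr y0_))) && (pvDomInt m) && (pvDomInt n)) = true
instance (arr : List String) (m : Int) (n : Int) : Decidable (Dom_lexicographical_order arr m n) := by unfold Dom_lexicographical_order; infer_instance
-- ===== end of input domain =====

-- B replaces A's nested loops with counter and break by a two-line recursive out-of-order
-- predicate summed as booleans over range(n) (objective: simpler, a different decomposition).
-- Equivalence is proved on Pre_, exactly the inputs where the Python A returns (elsewhere A
-- raises IndexError).

-- ===== PORT A =====
-- A-side helper: the inner loop 'for j in range(1,m): if ord(arr[i][j]) < ord(arr[i][j-1]): c+=1; break'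
-- ('count once and break' is exactly a short-circuit any); indexing is in range under Pre_.
def pvDescentScan (l : List Char) (m : Int) : Bool :=
  (PySem.List.pyRange 1 m 1).any (fun j =>
    (PySem.List.pyGetD l j ' ').toNat < (PySem.List.pyGetD l (j - 1) ' ').toNat)

def lexicographical_order (arr : List String) (m : Int) (n : Int) : Int :=
  (PySem.List.pyRange 0 n 1).foldl (fun c i =>
    let s := (PySem.List.pyGetD arr i "").toList   -- arr[i]; in range under Pre_
    if pvDescentScan s m then c + 1 else c) 0

-- ===== PORT B =====
-- B-side helper: 'out_of_order(i, j) = j < m and (arr[i][j] < arr[i][j-1] or out_of_order(i, j+1))';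
-- Python's '<' on one-character strings is code-point order = Char's '<'; indexing (in range
-- under Pre_) is pyGetD as in the A-port.
def pvOutOfOrder (arr : List String) (m : Int) (i : Int) (j : Int) : Bool :=
  if h : j < m then
    (decide ((PySem.List.pyGetD (PySem.List.pyGetD arr i "").toList j ' ') <
             (PySem.List.pyGetD (PySem.List.pyGetD arr i "").toList (j - 1) ' '))
      || pvOutOfOrder arr m i (j + 1))
  else false
termination_by (m - j).toNat
decreasing_by omega

-- 'sum(out_of_order(i, 1) for i in range(n))': booleans count as 1/0
def lexicographical_order_alt (arr : List String) (m : Int) (n : Int) : Int :=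
  ((PySem.List.pyRange 0 n 1).map (fun i => if pvOutOfOrder arr m i 1 then (1 : Int) else 0)).sum

-- ===== PRECONDITION & SPEC =====
-- Pre_ holds exactly where the Python A returns: either m ≤ 1 (nothing is ever indexed), or
-- n ≤ len(arr) and each of the first n strings is long enough (≥ m) or contains an adjacent
-- descent (so A's inner scan breaks before running off the string's end).
def Pre_lexicographical_order (arr : List String) (m : Int) (n : Int) : Prop :=
  m ≤ 1 ∨ (n ≤ (arr.length : Int) ∧ ∀ s ∈ arr.take n.toNat,
    m ≤ (s.toList.length : Int) ∨ ¬ s.toList.IsChain (fun a b => a.toNat ≤ b.toNat))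
instance (arr : List String) (m : Int) (n : Int) : Decidable (Pre_lexicographical_order arr m n) := by
  unfold Pre_lexicographical_order; infer_instance

def pvWitness_lexicographical_order : List String × Int × Int := (["ab", "ba", "ca"], 2, 2)

def Spec_lexicographical_order (arr : List String) (m : Int) (n : Int) (out : Int) : Prop := out = lexicographical_order_alt arr m n
instance (arr : List String) (m : Int) (n : Int) (out : Int) : Decidable (Spec_lexicographical_order arr m n out) := by unfold Spec_lexicographical_order; infer_instance

-- ===== CLAIM (what is proved, stated in full; the proofs are below) =====
def Claim_equal_lexicographical_order : Prop := ∀ (arr : List String) (m : Int) (n : Int), Dom_lexicographical_order arr m n → Pre_lexicographical_order arr m n → Spec_lexicographical_order arr m n (lexicographical_order arr m n)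

-- ===== LEMMAS AND PROOFS =====

-- B's recursive predicate computes A's short-circuit scan of range(j, m)
lemma pv_scan_eq (arr : List String) (m : Int) (i : Int) : ∀ (j : Int),
    pvOutOfOrder arr m i j =
      (PySem.List.pyRange j m 1).any (fun k =>
        (PySem.List.pyGetD (PySem.List.pyGetD arr i "").toList k ' ').toNat <
        (PySem.List.pyGetD (PySem.List.pyGetD arr i "").toList (k - 1) ' ').toNat) := by
  intro j
  rw [pvOutOfOrder]
  by_cases h : j < m
  · rw [dif_pos h, PySem.List.pyRange_one_cons h, List.any_cons,
        pv_scan_eq arr m i (j + 1)]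
    congr 1
  · rw [dif_neg h, PySem.List.pyRange_one_eq_nil (by omega)]
    rfl
termination_by j => (m - j).toNat
decreasing_by omega

-- a counting foldl is the sum of the 0/1 indicators
lemma pv_fold_sum (q : Int → Bool) :
    ∀ (L : List Int) (c : Int),
      L.foldl (fun c i => if q i then c + 1 else c) c
        = c + (L.map (fun i => if q i then (1 : Int) else 0)).sum
  | [], c => by simp
  | i :: L, c => by
    simp only [List.foldl_cons, List.map_cons, List.sum_cons, pv_fold_sum q L]
    by_cases h : q i <;> simp [h, add_assoc]

-- ===== VERDICT (by name: the statement is the Claim_ definition above) =====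
theorem lexicographical_order_spec : Claim_equal_lexicographical_order := by
  intro arr m n _ _
  unfold Spec_lexicographical_order lexicographical_order lexicographical_order_alt
  rw [pv_fold_sum]
  simp only [zero_add]
  refine congrArg List.sum (List.map_congr_left fun i _ => ?_)
  rw [pv_scan_eq arr m i 1]
  rfl
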